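-- pv_equiv track=rewrite | github.com/hiraku00/AtCoder-Practice | AlgorithmAndMath/3rd/008.py | count_combination
-- ===== SOURCE A (Python) =====
-- def count_combination(N, S):
--     cnt = 0
--     for red in range(1, N+1):
--         max_blue = min(N, S - red)
--         if max_blue >= 1:
--             cnt += max_blue
--         else:
--             break
--     return cnt
-- ===== SOURCE B (Python) =====
-- def count_combination(N, S):
--     # Closed-form O(1): reds 1..k get N blues each; reds k+1..R get S-red blues (arithmetic series).
--     R = min(N, S - 1)
--     if N < 1 or R < 1:
--         return 0
--     k = max(0, min(R, S - N))
--     a = S - R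
--     b = S - k - 1
--     return k * N + (a + b) * (R - k) // 2
-- ===== Notes on version B (the rewrite author's own statement) =====
-- stated objective: faster
-- what changed: Replaced the O(N) loop summing min(N, S-red) per red with a closed-form piecewise split: k reds contribute N each, the rest form an arithmetic series summed by formula.
import Mathlib
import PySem

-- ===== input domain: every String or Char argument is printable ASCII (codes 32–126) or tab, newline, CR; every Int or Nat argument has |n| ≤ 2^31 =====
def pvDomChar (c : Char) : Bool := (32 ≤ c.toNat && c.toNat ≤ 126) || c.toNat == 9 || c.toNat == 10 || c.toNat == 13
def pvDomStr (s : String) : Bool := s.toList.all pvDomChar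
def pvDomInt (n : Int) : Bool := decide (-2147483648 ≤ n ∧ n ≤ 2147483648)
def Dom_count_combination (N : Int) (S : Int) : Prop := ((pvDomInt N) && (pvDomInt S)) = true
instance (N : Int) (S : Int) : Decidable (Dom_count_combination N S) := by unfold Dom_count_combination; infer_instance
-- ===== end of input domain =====

-- B replaces A's O(N) summation loop by a closed-form piecewise arithmetic-series formula (O(1)).

-- ===== PORT A =====
-- the for-loop 'for red in range(1, N+1)' with early break, carrying the accumulator cnt
-- (range(1, N+1) ported as a counting recursion on red, since Python's range is lazy)
def countLoopA (N S red cnt : Int) : Int :=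
  if red < N + 1 then
    let max_blue := min N (S - red)
    if max_blue ≥ 1 then countLoopA N S (red + 1) (cnt + max_blue) else cnt
  else cnt
termination_by (N + 1 - red).toNat
decreasing_by simp_all

def count_combination (N : Int) (S : Int) : Int :=
  countLoopA N S 1 0

-- ===== PORT B =====
def count_combination_alt (N : Int) (S : Int) : Int :=
  let R := min N (S - 1)
  if N < 1 ∨ R < 1 then 0
  else
    let k := max 0 (min R (S - N))
    let a := S - R
    let b := S - k - 1
    k * N + PySem.Int.floordiv ((a + b) * (R - k)) 2

-- ===== PRECONDITION & SPEC =====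
def Spec_count_combination (N : Int) (S : Int) (out : Int) : Prop := out = count_combination_alt N S
instance (N : Int) (S : Int) (out : Int) : Decidable (Spec_count_combination N S out) := by unfold Spec_count_combination; infer_instance

-- ===== CLAIM (what is proved, stated in full; the proofs are below) =====
def Claim_equal_count_combination : Prop := ∀ (N : Int) (S : Int), Dom_count_combination N S → Spec_count_combination N S (count_combination N S)

-- ===== LEMMAS AND PROOFS =====

-- doubled closed form of the loop's value when it starts at red = r (division-free)
def Daux (N S r : Int) : Int :=
  if r ≤ min N (S - 1) then
    2 * N * (max 0 (min (min N (S - 1)) (S - N) - r + 1)) +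
      (if max r (S - N + 1) ≤ min N (S - 1) then
        (2 * S - max r (S - N + 1) - min N (S - 1)) * (min N (S - 1) - max r (S - N + 1) + 1)
       else 0)
  else 0

theorem countLoopA_acc (N S : Int) : ∀ (n : Nat) (red : Int), n = (N + 1 - red).toNat →
    ∀ cnt, countLoopA N S red cnt = cnt + countLoopA N S red 0 := by
  intro n
  induction n with
  | zero =>
    intro red hn cnt
    have e : ∀ c, countLoopA N S red c = c := by
      intro c; rw [countLoopA.eq_def, if_neg (by omega)]
    rw [e cnt, e 0]; ring
  | succ m ih =>
    intro red hn cnt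
    have hlt : red < N + 1 := by omega
    by_cases h : min N (S - red) ≥ 1
    · have e : ∀ c, countLoopA N S red c = countLoopA N S (red + 1) (c + min N (S - red)) := by
        intro c; rw [countLoopA.eq_def, if_pos hlt]; simp only [if_pos h]
      rw [e cnt, e 0, ih (red + 1) (by omega) (cnt + min N (S - red)),
          ih (red + 1) (by omega) (0 + min N (S - red))]
      ring
    · have e : ∀ c, countLoopA N S red c = c := by
        intro c; rw [countLoopA.eq_def, if_pos hlt]; simp only [if_neg h]
      rw [e cnt, e 0]; ring

theorem Daux_step (N S r : Int) (h1 : 1 ≤ r) (hR : r ≤ min N (S - 1)) :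
    Daux N S r = 2 * min N (S - r) + Daux N S (r + 1) := by
  unfold Daux
  rcases le_or_gt r (S - N) with hc | hc
  · -- min N (S - r) = N, first term shrinks by one N, tail unchanged
    have hmin : min N (S - r) = N := by omega
    have hmx : max r (S - N + 1) = S - N + 1 := by omega
    have hmx' : max (r + 1) (S - N + 1) = S - N + 1 := by omega
    have hM : min (min N (S - 1)) (S - N) ≥ r := by omega
    have h1m : max 0 (min (min N (S - 1)) (S - N) - r + 1) = min (min N (S - 1)) (S - N) - r + 1 := by omega
    rcases le_or_gt (r + 1) (min N (S - 1)) with h2 | h2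
    · have h2m : max 0 (min (min N (S - 1)) (S - N) - (r + 1) + 1) = min (min N (S - 1)) (S - N) - (r + 1) + 1 := by omega
      simp only [if_pos hR, if_pos h2, hmx, hmx', h1m, h2m, hmin]
      ring
    · -- r = min N (S-1); then r = S - N is impossible? no: then tail empty both times
      have hrR : r = min N (S - 1) := by omega
      have hMv : min (min N (S - 1)) (S - N) = r := by omega
      have htail : ¬ (S - N + 1 ≤ min N (S - 1)) := by omega
      simp only [if_pos hR, if_neg (by omega : ¬ (r + 1 ≤ min N (S - 1))), hmx, hMv, hmin,
        if_neg htail]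
      have hone : max 0 (r - r + 1) = (1:Int) := by omega
      rw [hone]; ring
  · -- min N (S - r) = S - r, first term zero, arithmetic-series tail peels its head
    have hmin : min N (S - r) = S - r := by omega
    have h1m : max 0 (min (min N (S - 1)) (S - N) - r + 1) = 0 := by omega
    have hmx : max r (S - N + 1) = r := by omega
    rcases le_or_gt (r + 1) (min N (S - 1)) with h2 | h2
    · have h2m : max 0 (min (min N (S - 1)) (S - N) - (r + 1) + 1) = 0 := by omega
      have hmx' : max (r + 1) (S - N + 1) = r + 1 := by omega
      simp only [if_pos hR, if_pos h2, hmx, hmx', h1m, h2m, hmin]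
      ring
    · have hrR : r = min N (S - 1) := by omega
      simp only [if_pos hR, if_neg (by omega : ¬ (r + 1 ≤ min N (S - 1)))]
      rw [if_pos (by omega : max r (S - N + 1) ≤ min N (S - 1)), hmx, hmin]
      rw [h1m]
      have : min N (S - 1) = r := hrR.symm
      rw [this]; ring

theorem loop_eq_Daux (N S : Int) : ∀ (n : Nat) (r : Int), 1 ≤ r → n = (N + 1 - r).toNat →
    2 * countLoopA N S r 0 = Daux N S r := by
  intro n
  induction n with
  | zero =>
    intro r h1 hn
    rw [countLoopA.eq_def, if_neg (by omega)]
    unfold Daux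
    rw [if_neg (by omega)]
    ring
  | succ m ih =>
    intro r h1 hn
    have hlt : r < N + 1 := by omega
    rw [countLoopA.eq_def, if_pos hlt]
    dsimp only
    split_ifs with h
    · rw [countLoopA_acc N S m (r + 1) (by omega) (0 + min N (S - r)), zero_add]
      have hR : r ≤ min N (S - 1) := by omega
      rw [Daux_step N S r h1 hR, mul_add, ih (r + 1) (by omega) (by omega)]
    · -- break: S - r < 1 (since r ≤ N), so r > min N (S-1)
      unfold Daux
      rw [if_neg (by omega)]
      ring

theorem floordiv_two_mul (m : Int) : PySem.Int.floordiv (2 * m) 2 = m := by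
  rw [PySem.Int.floordiv_eq_ediv_of_pos (by norm_num)]
  omega

-- ===== VERDICT (by name: the statement is the Claim_ definition above) =====
theorem count_combination_spec : Claim_equal_count_combination := by
  intro N S _hdom
  simp only [Spec_count_combination, count_combination, count_combination_alt]
  have hmain := loop_eq_Daux N S (N + 1 - 1).toNat 1 le_rfl rfl
  split_ifs with h
  · -- N < 1 or min N (S-1) < 1 : loop yields 0
    have : Daux N S 1 = 0 := by unfold Daux; rw [if_neg (by omega)]
    omega
  · rw [not_or, not_lt, not_lt] at h
    obtain ⟨hN, hR⟩ := h
    set R := min N (S - 1) with hRdef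
    set k := max 0 (min R (S - N)) with hkdef
    -- the series numerator is even
    have heven : ∃ m : Int, (S - R + (S - k - 1)) * (R - k) = 2 * m := by
      rcases Int.even_or_odd (R - k) with ⟨t, ht⟩ | ⟨t, ht⟩
      · exact ⟨(S - R + (S - k - 1)) * t, by rw [ht]; ring⟩
      · -- R - k odd ⇒ S - R + S - k - 1 = 2S - (R + k) - 1 even
        have : ∃ u : Int, S - R + (S - k - 1) = 2 * u := ⟨S - k - 1 - t, by omega⟩
        obtain ⟨u, hu⟩ := this
        exact ⟨u * (R - k), by rw [hu]; ring⟩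
    obtain ⟨m, hm⟩ := heven
    rw [hm, floordiv_two_mul]
    -- Daux at r = 1 equals the doubled closed form
    have hD : Daux N S 1 = 2 * (k * N) + 2 * m := by
      unfold Daux
      rw [if_pos (by omega : (1:Int) ≤ min N (S - 1)), ← hRdef]
      have hk1 : max 0 (min R (S - N) - 1 + 1) = k := by omega
      rcases le_or_gt (S - N + 1) R with ht | ht
      · -- nonempty tail; max 1 (S-N+1) = k + 1
        have hlo : max 1 (S - N + 1) = k + 1 := by omega
        rw [if_pos (by omega : max 1 (S - N + 1) ≤ R), hk1, hlo]
        have h2m : (2 * S - (k + 1) - R) * (R - (k + 1) + 1) = 2 * m := by rw [← hm]; ring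
        rw [h2m]; ring
      · -- empty tail: k = R, series part is zero
        have hkR : k = R := by omega
        have hm0 : m = 0 := by
          rw [hkR] at hm
          have h0 : (S - R + (S - R - 1)) * (R - R) = 0 := by ring
          omega
        rw [if_neg (by omega : ¬ max 1 (S - N + 1) ≤ R), hk1, hm0, hkR]
        ring
    omega
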